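-- pv_equiv track=rewrite | github.com/JakobHuesken/deep_sort | deep_sort/multicam_matching.py | synchronize_frames
-- ===== SOURCE A (Python) =====
-- def synchronize_frames(batchFrames, last_frame_number=None, time_threshold=30): # In milliseconds
--     # Sort frames by timestamp
--     sorted_frames = sorted(batchFrames, key=lambda x: x['timestamp'])
--
--     # Initialize frame_id and last_timestamp
--     if last_frame_number is None:
--         frame_id = 1
--     else:
--         frame_id = last_frame_number + 1
--
--     last_timestamp = None
--
--     # Iterate through frames
--     for frame in sorted_frames:
--         if last_timestamp is None:
--             last_timestamp = frame['timestamp']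
--         elif frame['timestamp'] - last_timestamp > time_threshold:
--             frame_id += 1
--         frame['frame_id'] = frame_id
--         last_timestamp = frame['timestamp']
--
--     # Return synchronized frames and updated last frame number
--     return sorted_frames, frame_id
-- ===== SOURCE B (Python) =====
-- def synchronize_frames(batchFrames, last_frame_number=None, time_threshold=30): # In milliseconds
--     # Table-driven: sort, build per-gap increment table, prefix-sum it into ids, assign.
--     sorted_frames = sorted(batchFrames, key=lambda x: x['timestamp'])
--     start_id = 1 if last_frame_number is None else last_frame_number + 1
--     incs = [int(b['timestamp'] - a['timestamp'] > time_threshold)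
--             for a, b in zip(sorted_frames, sorted_frames[1:])]
--     ids = [start_id]
--     for g in incs:
--         ids.append(ids[-1] + g)
--     for frame, fid in zip(sorted_frames, ids):
--         frame['frame_id'] = fid
--     return sorted_frames, ids[-1]
-- ===== Notes on version B (the rewrite author's own statement) =====
-- stated objective: alternative
-- what changed: Replaces A's single stateful loop (threading frame_id and last_timestamp through the iteration) with a table-driven decomposition: a consecutive-gap increment table built by zipping the sorted list with its tail, prefix-summed into the per-frame id list, then a separate assignment pass.
import Mathlib
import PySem

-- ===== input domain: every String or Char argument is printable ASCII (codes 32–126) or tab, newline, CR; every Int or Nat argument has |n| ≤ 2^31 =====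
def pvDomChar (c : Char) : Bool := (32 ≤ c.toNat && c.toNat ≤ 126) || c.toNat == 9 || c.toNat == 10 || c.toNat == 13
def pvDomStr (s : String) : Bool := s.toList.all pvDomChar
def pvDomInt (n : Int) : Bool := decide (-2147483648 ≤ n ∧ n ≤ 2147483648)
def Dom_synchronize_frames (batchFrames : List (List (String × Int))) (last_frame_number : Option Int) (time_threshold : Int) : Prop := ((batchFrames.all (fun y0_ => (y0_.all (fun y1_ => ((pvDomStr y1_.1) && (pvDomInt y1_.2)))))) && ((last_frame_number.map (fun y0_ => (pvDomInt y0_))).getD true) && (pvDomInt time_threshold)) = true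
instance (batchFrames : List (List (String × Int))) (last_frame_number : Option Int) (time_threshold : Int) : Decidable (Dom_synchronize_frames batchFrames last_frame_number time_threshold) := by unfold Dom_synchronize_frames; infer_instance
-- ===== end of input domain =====

-- B replaces A's single stateful loop (frame_id/last_timestamp threaded through the iteration)
-- by a table-driven decomposition: consecutive-gap increment table, prefix sums, then assignment.
-- Equivalence is about the RETURN value only (the Python A mutates the frame dicts in place; B
-- performs the same mutation).


-- ===== PORT A =====
-- frame['timestamp'] (first match in the association list; Pre_ guarantees the key exists,
-- so the getD 0 default is never consulted inside Pre_)
def pvTs (f : List (String × Int)) : Int :=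
  ((PySem.Dict.mk f).get? "timestamp").getD 0

-- frame['frame_id'] = v  (dict assignment: overwrite in place, else append)
def pvSetFid (f : List (String × Int)) (v : Int) : List (String × Int) :=
  ((PySem.Dict.mk f).insert "frame_id" v).items

-- the for-loop of A: state = (frame_id, last_timestamp), output list built in order
def syncLoopA (tt : Int) (frames : List (List (String × Int))) (fid : Int)
    (lastTs : Option Int) : (List (List (String × Int))) × Int :=
  match frames with
  | [] => ([], fid)
  | f :: rest =>
    let t := pvTs f
    let fid' := match lastTs with
      | none => fid
      | some l => if t - l > tt then fid + 1 else fid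
    let r := syncLoopA tt rest fid' (some t)
    (pvSetFid f fid' :: r.1, r.2)

def synchronize_frames (batchFrames : List (List (String × Int))) (last_frame_number : Option Int) (time_threshold : Int) : (List (List (String × Int))) × Int :=
  let sorted_frames := PySem.List.sorted batchFrames (fun x => pvTs x) false
  let frame_id : Int := match last_frame_number with
    | none => 1
    | some n => n + 1
  syncLoopA time_threshold sorted_frames frame_id none

-- ===== PORT B =====
def synchronize_frames_alt (batchFrames : List (List (String × Int))) (last_frame_number : Option Int) (time_threshold : Int) : (List (List (String × Int))) × Int :=
  let sorted_frames := PySem.List.sorted batchFrames (fun x => pvTs x) false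
  let start_id : Int := match last_frame_number with
    | none => 1
    | some n => n + 1
  -- incs: one 0/1 entry per consecutive pair (zip with the tail, i.e. sorted_frames[1:])
  let incs : List Int := (sorted_frames.zip sorted_frames.tail).map
    (fun p => if pvTs p.2 - pvTs p.1 > time_threshold then 1 else 0)
  -- ids: prefix sums, ids.append(ids[-1] + g)
  let ids : List Int := incs.foldl (fun acc g => acc ++ [acc.getLastD 0 + g]) [start_id]
  -- assignment pass: frame['frame_id'] = fid over zip(sorted_frames, ids)
  let assigned := (sorted_frames.zip ids).map (fun p => pvSetFid p.1 p.2)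
  (assigned, ids.getLastD 0)   -- ids is never empty, so getLastD renders ids[-1] exactly

-- ===== PRECONDITION & SPEC =====
-- Pre_ excludes exactly the inputs on which the Python A raises KeyError: a frame without a
-- 'timestamp' key.
def Pre_synchronize_frames (batchFrames : List (List (String × Int))) (last_frame_number : Option Int) (time_threshold : Int) : Prop :=
  ∀ f ∈ batchFrames, ((PySem.Dict.mk f).get? "timestamp").isSome = true
instance (batchFrames : List (List (String × Int))) (last_frame_number : Option Int) (time_threshold : Int) : Decidable (Pre_synchronize_frames batchFrames last_frame_number time_threshold) := by unfold Pre_synchronize_frames; infer_instance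

def pvWitness_synchronize_frames : (List (List (String × Int))) × Option Int × Int :=
  ([[("timestamp", 5)], [("timestamp", 100), ("x", 2)]], some 3, 30)

def Spec_synchronize_frames (batchFrames : List (List (String × Int))) (last_frame_number : Option Int) (time_threshold : Int) (out : (List (List (String × Int))) × Int) : Prop := out = synchronize_frames_alt batchFrames last_frame_number time_threshold
instance (batchFrames : List (List (String × Int))) (last_frame_number : Option Int) (time_threshold : Int) (out : (List (List (String × Int))) × Int) : Decidable (Spec_synchronize_frames batchFrames last_frame_number time_threshold out) := by unfold Spec_synchronize_frames; infer_instance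

-- ===== CLAIM (what is proved, stated in full; the proofs are below) =====
def Claim_equal_synchronize_frames : Prop := ∀ (batchFrames : List (List (String × Int))) (last_frame_number : Option Int) (time_threshold : Int), Dom_synchronize_frames batchFrames last_frame_number time_threshold → Pre_synchronize_frames batchFrames last_frame_number time_threshold → Spec_synchronize_frames batchFrames last_frame_number time_threshold (synchronize_frames batchFrames last_frame_number time_threshold)

-- ===== LEMMAS AND PROOFS =====

-- clean form of A's loop once last_timestamp is set
def goAux (tt : Int) (prev : Int) (fid : Int) : List (List (String × Int)) → (List (List (String × Int))) × Int
  | [] => ([], fid)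
  | f :: rest =>
    let fid' := if pvTs f - prev > tt then fid + 1 else fid
    let r := goAux tt (pvTs f) fid' rest
    (pvSetFid f fid' :: r.1, r.2)

theorem syncLoopA_some (tt : Int) (frames : List (List (String × Int))) :
    ∀ (fid l : Int), syncLoopA tt frames fid (some l) = goAux tt l fid frames := by
  induction frames with
  | nil => intro fid l; rfl
  | cons f rest ih =>
    intro fid l
    simp only [syncLoopA, goAux, ih]

-- B's prefix-sum machinery
def pvStep (acc : List Int) (g : Int) : List Int := acc ++ [acc.getLastD 0 + g]

def finalOf (a : Int) : List Int → Int
  | [] => a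
  | c :: cs => finalOf (a + c) cs

theorem ids_key (cs : List Int) : ∀ (pre : List Int) (a : Int),
    List.foldl pvStep (pre ++ [a]) cs = pre ++ List.foldl pvStep [a] cs := by
  induction cs with
  | nil => intro pre a; simp
  | cons c cs ih =>
    intro pre a
    have e1 : pvStep (pre ++ [a]) c = (pre ++ [a]) ++ [a + c] := by
      simp [pvStep]
    have e2 : pvStep [a] c = [a] ++ [a + c] := by simp [pvStep]
    calc List.foldl pvStep (pre ++ [a]) (c :: cs)
        = List.foldl pvStep ((pre ++ [a]) ++ [a + c]) cs := by rw [List.foldl_cons, e1]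
      _ = (pre ++ [a]) ++ List.foldl pvStep [a + c] cs := ih (pre ++ [a]) (a + c)
      _ = pre ++ (([a] : List Int) ++ List.foldl pvStep [a + c] cs) := by
            rw [List.append_assoc]
      _ = pre ++ List.foldl pvStep ([a] ++ [a + c]) cs := by rw [ih [a] (a + c)]
      _ = pre ++ List.foldl pvStep [a] (c :: cs) := by rw [List.foldl_cons, e2]

theorem ids_cons (a c : Int) (cs : List Int) :
    List.foldl pvStep [a] (c :: cs) = a :: List.foldl pvStep [a + c] cs := by
  have e2 : pvStep [a] c = [a] ++ [a + c] := by simp [pvStep]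
  rw [List.foldl_cons, e2, ids_key cs [a] (a + c)]
  rfl

theorem ids_last (cs : List Int) : ∀ (a d : Int),
    (List.foldl pvStep [a] cs).getLastD d = finalOf a cs := by
  induction cs with
  | nil => intro a d; rfl
  | cons c cs ih =>
    intro a d
    rw [ids_cons, List.getLastD_cons, ih (a + c) a]
    rfl

-- main lemma: B's table construction equals the stateful remainder of A's loop
theorem mainB (tt : Int) : ∀ (rest : List (List (String × Int))) (f : List (String × Int)) (fid : Int),
    (((f :: rest).zip (List.foldl pvStep [fid]
        (((f :: rest).zip (f :: rest).tail).map
          (fun p => if pvTs p.2 - pvTs p.1 > tt then 1 else 0)))).map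
        (fun p => pvSetFid p.1 p.2)
      = pvSetFid f fid :: (goAux tt (pvTs f) fid rest).1)
    ∧ finalOf fid (((f :: rest).zip (f :: rest).tail).map
          (fun p => if pvTs p.2 - pvTs p.1 > tt then 1 else 0))
      = (goAux tt (pvTs f) fid rest).2 := by
  intro rest
  induction rest with
  | nil => intro f fid; simp [goAux, finalOf]
  | cons g rs ih =>
    intro f fid
    have hc : fid + (if pvTs g - pvTs f > tt then (1:Int) else 0)
        = if pvTs g - pvTs f > tt then fid + 1 else fid := by
      split_ifs <;> omega
    simp only [List.tail_cons, List.zip_cons_cons, List.map_cons, ids_cons,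
      List.map_cons, finalOf]
    rw [hc]
    obtain ⟨ih1, ih2⟩ := ih g (if pvTs g - pvTs f > tt then fid + 1 else fid)
    simp only [List.tail_cons] at ih1 ih2
    constructor
    · rw [ih1]
      simp [goAux]
    · rw [ih2]
      simp [goAux]

theorem core (tt fid0 : Int) (l : List (List (String × Int))) :
    syncLoopA tt l fid0 none =
      ((l.zip (List.foldl pvStep [fid0]
          ((l.zip l.tail).map
            (fun p => if pvTs p.2 - pvTs p.1 > tt then 1 else 0)))).map
          (fun p => pvSetFid p.1 p.2),
       (List.foldl pvStep [fid0]
          ((l.zip l.tail).map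
            (fun p => if pvTs p.2 - pvTs p.1 > tt then 1 else 0))).getLastD 0) := by
  cases l with
  | nil => rfl
  | cons f rest =>
    obtain ⟨h1, h2⟩ := mainB tt rest f fid0
    rw [h1, ids_last, h2]
    simp only [syncLoopA, syncLoopA_some]

-- ===== VERDICT (by name: the statement is the Claim_ definition above) =====
theorem synchronize_frames_spec : Claim_equal_synchronize_frames := by
  intro batchFrames last_frame_number time_threshold _hdom _hpre
  unfold Spec_synchronize_frames
  cases last_frame_number with
  | none =>
    show syncLoopA time_threshold _ 1 none = _
    exact core time_threshold 1 _
  | some n =>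
    show syncLoopA time_threshold _ (n + 1) none = _
    exact core time_threshold (n + 1) _
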